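-- pv_equiv track=rewrite | github.com/gejioka/thesis | code/network_tools.py | find_interlayer_links
-- ===== SOURCE A (Python) =====
-- def find_interlayer_links(node_layer,neighbors):
--     """
--     Description: Find all inter-layer links for a specific node
--
--     Args:
--         node_layer (int): Layer of the node
--         neighbors (list): A list with all neighbors of node
--
--     Returns:
--         A list with all inter-layer links
--     """
--     interlayer_links = {}
--     for neighbor in neighbors:
--         if node_layer != neighbor[1]:
--             if neighbor[1] not in interlayer_links:
--                 temp_list = []
--                 temp_list.append(neighbor[0])
--                 interlayer_links[neighbor[1]] = temp_list
--             else: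
--                 interlayer_links[neighbor[1]].append(neighbor[0])
--
--     return interlayer_links
-- ===== SOURCE B (Python) =====
-- def find_interlayer_links(node_layer, neighbors):
--     """Group inter-layer neighbors by layer: distinct layers in encounter order,
--     each mapped to all neighbor ids in that layer (dict-comprehension two-pass
--     instead of A's incremental dict-append loop)."""
--     layers = dict.fromkeys(l for _, l in neighbors if l != node_layer)
--     return {l: [v for v, ll in neighbors if ll == l] for l in layers}
-- ===== Notes on version B (the rewrite author's own statement) =====
-- stated objective: idiomatic
-- what changed: A builds the grouping incrementally with a dict of growing lists inside one loop; B first collects the distinct inter-layer layers in encounter order via dict.fromkeys and then builds the result with a dict comprehension whose values are per-layer list comprehensions over the neighbors.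
import Mathlib
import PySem

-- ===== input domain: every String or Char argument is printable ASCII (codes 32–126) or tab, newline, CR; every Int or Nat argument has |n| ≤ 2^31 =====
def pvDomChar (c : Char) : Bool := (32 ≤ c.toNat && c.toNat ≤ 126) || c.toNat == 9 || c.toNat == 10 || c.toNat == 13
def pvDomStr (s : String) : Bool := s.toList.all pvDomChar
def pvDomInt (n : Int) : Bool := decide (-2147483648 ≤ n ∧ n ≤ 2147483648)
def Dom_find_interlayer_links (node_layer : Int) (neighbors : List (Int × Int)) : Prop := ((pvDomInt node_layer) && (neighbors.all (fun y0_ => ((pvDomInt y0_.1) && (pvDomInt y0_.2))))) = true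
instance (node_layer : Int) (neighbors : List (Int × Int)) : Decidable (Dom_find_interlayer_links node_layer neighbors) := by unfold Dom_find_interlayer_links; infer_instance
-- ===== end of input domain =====

-- ===== PORT A =====
-- B groups by a two-pass dict comprehension (distinct layers, then per-layer filter)
-- instead of A's incremental dict-append loop; same value, alternative structure.
def find_interlayer_links (node_layer : Int) (neighbors : List (Int × Int)) : List (Int × List Int) :=
  (neighbors.foldl
    (fun interlayer_links neighbor =>
      if node_layer ≠ neighbor.2 then
        if interlayer_links.contains neighbor.2 = false then
          -- temp_list = []; temp_list.append(neighbor[0]); interlayer_links[neighbor[1]] = temp_list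
          interlayer_links.insert neighbor.2 [neighbor.1]
        else
          -- interlayer_links[neighbor[1]].append(neighbor[0])
          interlayer_links.modify neighbor.2 [] (fun xs => xs ++ [neighbor.1])
      else interlayer_links)
    PySem.Dict.empty).items

-- ===== PORT B =====
def find_interlayer_links_alt (node_layer : Int) (neighbors : List (Int × Int)) : List (Int × List Int) :=
  let layers := PySem.List.dedup ((neighbors.filter (fun p => p.2 != node_layer)).map (fun p => p.2))
  layers.map (fun l => (l, (neighbors.filter (fun p => p.2 == l)).map (fun p => p.1)))

-- ===== PRECONDITION & SPEC =====
def Spec_find_interlayer_links (node_layer : Int) (neighbors : List (Int × Int)) (out : List (Int × List Int)) : Prop := out = find_interlayer_links_alt node_layer neighbors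
instance (node_layer : Int) (neighbors : List (Int × Int)) (out : List (Int × List Int)) : Decidable (Spec_find_interlayer_links node_layer neighbors out) := by unfold Spec_find_interlayer_links; infer_instance

-- ===== CLAIM (what is proved, stated in full; the proofs are below) =====
def Claim_equal_find_interlayer_links : Prop := ∀ (node_layer : Int) (neighbors : List (Int × Int)), Dom_find_interlayer_links node_layer neighbors → Spec_find_interlayer_links node_layer neighbors (find_interlayer_links node_layer neighbors)

-- ===== LEMMAS AND PROOFS =====

-- A's loop body is, on every input, the uniform "modify with default []" step over
-- the swapped, filtered pair list.
theorem fil_foldl_eq (node_layer : Int) (neighbors : List (Int × Int))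
    (d : PySem.Dict Int (List Int)) :
    neighbors.foldl
      (fun interlayer_links neighbor =>
        if node_layer ≠ neighbor.2 then
          if interlayer_links.contains neighbor.2 = false then
            interlayer_links.insert neighbor.2 [neighbor.1]
          else
            interlayer_links.modify neighbor.2 [] (fun xs => xs ++ [neighbor.1])
        else interlayer_links) d
    = ((neighbors.filter (fun p => p.2 != node_layer)).map (fun p => (p.2, p.1))).foldl
        (fun d p => d.modify p.1 [] (fun xs => xs ++ [p.2])) d := by
  induction neighbors generalizing d with
  | nil => rfl
  | cons p ns ih =>
    simp only [List.foldl_cons, List.filter_cons]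
    by_cases hne : node_layer = p.2
    · have hpf : (p.2 != node_layer) = false := by simp [hne]
      rw [hpf, if_neg (fun h => h hne), ih]
      simp
    · have hpf : (p.2 != node_layer) = true := by simp [Ne.symm hne]
      rw [hpf, if_pos hne]
      simp only [if_true, List.map_cons, List.foldl_cons]
      by_cases hc : d.contains p.2 = false
      · rw [if_pos hc, ih]
        congr 1
        simp [PySem.Dict.modify, PySem.Dict.getD_of_not_contains d [] hc]
      · rw [if_neg hc, ih]

theorem find_interlayer_links_spec : Claim_equal_find_interlayer_links := by
  intro node_layer neighbors _
  unfold Spec_find_interlayer_links find_interlayer_links find_interlayer_links_alt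
  rw [fil_foldl_eq]
  set l' := (neighbors.filter (fun p => p.2 != node_layer)).map (fun p => (p.2, p.1)) with hl'
  have hnodup :
      ((l'.foldl (fun d p => d.modify p.1 [] (fun xs => xs ++ [p.2]))
        (PySem.Dict.empty : PySem.Dict Int (List Int)))).keys.Nodup := by
    exact PySem.Dict.nodup_keys_foldl_modify_key l' Prod.fst []
      (fun _ p => (fun xs => xs ++ [p.2])) _ (by simp)
  have hkeys :
      ((l'.foldl (fun d p => d.modify p.1 [] (fun xs => xs ++ [p.2]))
        (PySem.Dict.empty : PySem.Dict Int (List Int)))).keys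
        = PySem.List.dedup ((neighbors.filter (fun p => p.2 != node_layer)).map (fun p => p.2)) := by
    rw [PySem.Dict.keys_foldl_modify_key l' Prod.fst []
      (fun _ p => (fun xs => xs ++ [p.2]))]
    simp only [PySem.Dict.keys_empty, PySem.Set.update_nil_left, hl', List.map_map,
      PySem.List.dedup]
    rfl
  rw [PySem.Dict.items_eq_map_keys _ hnodup [], hkeys]
  apply List.map_congr_left
  intro k hk
  have hkne : k ≠ node_layer := by
    rcases (PySem.Set.mem_ofList _ k).1 hk with hmem
    rcases List.mem_map.1 hmem with ⟨p, hp, hpk⟩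
    rcases List.mem_filter.1 hp with ⟨_, hpne⟩
    intro h; rw [h] at hpk; simp at hpne; exact hpne (hpk ▸ rfl)
  congr 1
  rw [PySem.Dict.getD_foldl_modify_append l' PySem.Dict.empty k, hl']
  rw [List.filter_map, List.map_map, List.filter_filter]
  simp only [PySem.Dict.getD_empty, List.nil_append, Function.comp]
  congr 1
  apply List.filter_congr
  intro p _
  by_cases hpk : p.2 = k
  · simp [hpk, hkne]
  · simp [hpk]
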